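-- pv_equiv track=rewrite | github.com/wjddn279/Algorithms | Line/1번.py | solve
-- ===== SOURCE A (Python) =====
-- from _collections import deque
--
-- def iswall(x,y):
--     if not 0 <= x <= 200000: return False
--     if not 0 <= y <= 200000: return False
--     else: return True
--
-- def solve(start_cony,brown,time):
--
--     queue =deque()
--     queue.append((start_cony,brown,time))
--     visited = {}
--     while queue:
--         cony,brown,time = queue.popleft()
--         if cony == brown:
--             return time-1
--         next_cony = start_cony+(time*(time+1)//2)
--         if iswall(next_cony,brown-1) and (next_cony,brown-1) not in visited:
--             queue.append((next_cony,brown-1,time+1))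
--             visited[(next_cony,brown-1)] = 0
--         if iswall(next_cony,brown+1) and (next_cony,brown+1) not in visited:
--             queue.append((next_cony,brown+1,time+1))
--             visited[(next_cony, brown + 1)] = 0
--         if iswall(next_cony,brown*2) and (next_cony,brown*2) not in visited:
--             queue.append((next_cony,2*brown,time+1))
--             visited[(next_cony, 2*brown)] = 0
--     return -1
-- ===== SOURCE B (Python) =====
-- def solve(start_cony, brown, time):
--     # Level-synchronized BFS: one frontier of brown positions per time step,
--     # cony's position computed once per level instead of stored per node.
--     visited = set()
--     frontier = [brown]
--     cony = start_cony
--     t = time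
--     while frontier:
--         if cony in frontier:
--             return t - 1
--         next_cony = start_cony + t * (t + 1) // 2
--         nxt = []
--         if 0 <= next_cony <= 200000:
--             for b in frontier:
--                 for nb in (b - 1, b + 1, 2 * b):
--                     if 0 <= nb <= 200000 and (next_cony, nb) not in visited:
--                         visited.add((next_cony, nb))
--                         nxt.append(nb)
--         frontier = nxt
--         cony = next_cony
--         t += 1
--     return -1
-- ===== Notes on version B (the rewrite author's own statement) =====
-- stated objective: alternative
-- what changed: Replaces the deque BFS over (cony, brown, time) triples with a level-synchronized BFS: one frontier list of brown positions per time step, cony's position and the wall gate computed once per level instead of per node, and the visited dict replaced by a set of (cony, brown) pairs.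
import Mathlib
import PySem

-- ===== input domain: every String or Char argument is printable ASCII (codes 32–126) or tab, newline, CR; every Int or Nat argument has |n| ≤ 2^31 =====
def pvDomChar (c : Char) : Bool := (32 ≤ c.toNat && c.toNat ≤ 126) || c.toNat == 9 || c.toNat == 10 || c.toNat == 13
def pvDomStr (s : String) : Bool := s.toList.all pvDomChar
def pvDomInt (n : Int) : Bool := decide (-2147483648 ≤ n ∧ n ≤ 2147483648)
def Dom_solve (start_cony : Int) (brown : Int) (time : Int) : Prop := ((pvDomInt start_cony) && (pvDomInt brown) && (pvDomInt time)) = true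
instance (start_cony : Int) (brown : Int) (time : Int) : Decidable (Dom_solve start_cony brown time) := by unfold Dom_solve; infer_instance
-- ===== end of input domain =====

-- B rewrites A's node-by-node deque BFS as a level-synchronized BFS (one frontier list of
-- brown positions per time step, cony recomputed once per level); same results, no speed claim.
-- Both loop ports carry a fuel counter solely as a structural-recursion totality guard; the
-- fuel constants are proved sufficient on Dom_solve (the equivalence proof never hits 0).

-- ===== PORT A =====
def iswall (x y : Int) : Bool :=
  if ¬ (0 ≤ x ∧ x ≤ 200000) then false
  else if ¬ (0 ≤ y ∧ y ≤ 200000) then false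
  else true

def solveLoop (start_cony : Int) (fuel : Nat) (queue : List (Int × Int × Int))
    (visited : Std.HashMap (Int × Int) Int) : Int :=
  match fuel, queue with
  | _, [] => -1
  | 0, _ :: _ => -1  -- fuel guard only; never reached from solve on Dom_solve inputs
  | fuel + 1, (cony, brown, time) :: rest =>
    if cony = brown then time - 1
    else
      let next_cony := start_cony + PySem.Int.floordiv (time * (time + 1)) 2
      let s1 :=
        if iswall next_cony (brown - 1) = true ∧ visited.contains (next_cony, brown - 1) = false then
          (rest ++ [(next_cony, brown - 1, time + 1)], visited.insert (next_cony, brown - 1) 0)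
        else (rest, visited)
      let s2 :=
        if iswall next_cony (brown + 1) = true ∧ s1.2.contains (next_cony, brown + 1) = false then
          (s1.1 ++ [(next_cony, brown + 1, time + 1)], s1.2.insert (next_cony, brown + 1) 0)
        else s1
      let s3 :=
        if iswall next_cony (brown * 2) = true ∧ s2.2.contains (next_cony, brown * 2) = false then
          (s2.1 ++ [(next_cony, 2 * brown, time + 1)], s2.2.insert (next_cony, 2 * brown) 0)
        else s2
      solveLoop start_cony fuel s3.1 s3.2

def solve (start_cony : Int) (brown : Int) (time : Int) : Int :=
  solveLoop start_cony (3 ^ 131205) [(start_cony, brown, time)] Std.HashMap.emptyWithCapacity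

-- ===== PORT B =====
def pushChild (next_cony nb : Int) (st : List Int × Std.HashSet (Int × Int)) :
    List Int × Std.HashSet (Int × Int) :=
  if (0 ≤ nb ∧ nb ≤ 200000) ∧ st.2.contains (next_cony, nb) = false then
    (st.1 ++ [nb], st.2.insert (next_cony, nb))
  else st

def expandLevel (next_cony : Int) (frontier : List Int)
    (st : List Int × Std.HashSet (Int × Int)) : List Int × Std.HashSet (Int × Int) :=
  match frontier with
  | [] => st
  | b :: bs =>
      expandLevel next_cony bs
        ([b - 1, b + 1, 2 * b].foldl (fun s nb => pushChild next_cony nb s) st)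

def solveAltLoop (start_cony : Int) (fuel : Nat) (frontier : List Int) (cony : Int) (t : Int)
    (visited : Std.HashSet (Int × Int)) : Int :=
  match fuel, frontier with
  | _, [] => -1
  | 0, _ :: _ => -1  -- fuel guard only; never reached from solve_alt on Dom_solve inputs
  | fuel + 1, b :: bs =>
    if (b :: bs).contains cony then t - 1
    else
      let next_cony := start_cony + PySem.Int.floordiv (t * (t + 1)) 2
      let st :=
        if 0 ≤ next_cony ∧ next_cony ≤ 200000 then expandLevel next_cony (b :: bs) ([], visited)
        else ([], visited)
      solveAltLoop start_cony fuel st.1 next_cony (t + 1) st.2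

def solve_alt (start_cony : Int) (brown : Int) (time : Int) : Int :=
  solveAltLoop start_cony 131207 [brown] start_cony time Std.HashSet.emptyWithCapacity

-- ===== PRECONDITION & SPEC =====
def Spec_solve (start_cony : Int) (brown : Int) (time : Int) (out : Int) : Prop := out = solve_alt start_cony brown time
instance (start_cony : Int) (brown : Int) (time : Int) (out : Int) : Decidable (Spec_solve start_cony brown time out) := by unfold Spec_solve; infer_instance

-- ===== CLAIM (what is proved, stated in full; the proofs are below) =====
def Claim_equal_solve : Prop := ∀ (start_cony : Int) (brown : Int) (time : Int), Dom_solve start_cony brown time → Spec_solve start_cony brown time (solve start_cony brown time)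

-- ===== LEMMAS AND PROOFS =====

def mapT (c t : Int) (F : List Int) : List (Int × Int × Int) := F.map (fun b => (c, b, t))

def VR (d : Std.HashMap (Int × Int) Int) (s : Std.HashSet (Int × Int)) : Prop :=
  ∀ k, d.contains k = s.contains k

-- A's three in-place enqueue ifs, as one reusable step (proof-side mirror of solveLoop's body)
def pushA (nc t nb : Int) (st : List (Int × Int × Int) × Std.HashMap (Int × Int) Int) :
    List (Int × Int × Int) × Std.HashMap (Int × Int) Int :=
  if iswall nc nb = true ∧ st.2.contains (nc, nb) = false then
    (st.1 ++ [(nc, nb, t + 1)], st.2.insert (nc, nb) 0)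
  else st

lemma iswall_eq_decide (x y : Int) :
    iswall x y = (decide (0 ≤ x ∧ x ≤ 200000) && decide (0 ≤ y ∧ y ≤ 200000)) := by
  unfold iswall; split_ifs with h1 h2 <;> simp_all

-- the wall gate is closed at every time outside [-65601, 65600] (for |start_cony| ≤ 2^31)
lemma gate_dead (sc t : Int) (hsc : -2147483648 ≤ sc) (ht : 65601 ≤ t ∨ t ≤ -65602) :
    ¬ (0 ≤ sc + PySem.Int.floordiv (t * (t + 1)) 2
        ∧ sc + PySem.Int.floordiv (t * (t + 1)) 2 ≤ 200000) := by
  have hge : (2147683649 : Int) ≤ PySem.Int.floordiv (t * (t + 1)) 2 := by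
    rw [PySem.Int.le_floordiv_iff_mul_le (by norm_num)]
    rcases ht with h | h <;> nlinarith
  rintro ⟨-, h2⟩
  omega

lemma solveLoop_nil (sc : Int) (f : Nat) (d : Std.HashMap (Int × Int) Int) :
    solveLoop sc f [] d = -1 := by
  cases f <;> rw [solveLoop]

lemma solveAltLoop_nil (sc : Int) (f : Nat) (c t : Int) (s : Std.HashSet (Int × Int)) :
    solveAltLoop sc f [] c t s = -1 := by
  cases f <;> rw [solveAltLoop]

lemma solveLoop_pop_eq (sc : Int) (f : Nat) (c b t : Int) (rest : List (Int × Int × Int))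
    (d : Std.HashMap (Int × Int) Int) (h : c = b) :
    solveLoop sc (f + 1) ((c, b, t) :: rest) d = t - 1 := by
  rw [solveLoop]; simp [h]

lemma solveLoop_cons (sc : Int) (f : Nat) (c b t : Int) (rest : List (Int × Int × Int))
    (d : Std.HashMap (Int × Int) Int) (hne : ¬ c = b) :
    solveLoop sc (f + 1) ((c, b, t) :: rest) d =
      solveLoop sc f
        (pushA (sc + PySem.Int.floordiv (t * (t + 1)) 2) t (2 * b)
          (pushA (sc + PySem.Int.floordiv (t * (t + 1)) 2) t (b + 1)
            (pushA (sc + PySem.Int.floordiv (t * (t + 1)) 2) t (b - 1) (rest, d)))).1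
        (pushA (sc + PySem.Int.floordiv (t * (t + 1)) 2) t (2 * b)
          (pushA (sc + PySem.Int.floordiv (t * (t + 1)) 2) t (b + 1)
            (pushA (sc + PySem.Int.floordiv (t * (t + 1)) 2) t (b - 1) (rest, d)))).2 := by
  conv_lhs => rw [solveLoop]
  have h2 : (b * 2 : Int) = 2 * b := mul_comm b 2
  simp only [if_neg hne, h2, pushA]

lemma push_sim (nc t nb : Int) (Q : List (Int × Int × Int)) (acc : List Int)
    (d : Std.HashMap (Int × Int) Int) (s : Std.HashSet (Int × Int))
    (hvr : VR d s) (hgate : 0 ≤ nc ∧ nc ≤ 200000) :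
    (pushA nc t nb (Q ++ mapT nc (t + 1) acc, d)).1
        = Q ++ mapT nc (t + 1) (pushChild nc nb (acc, s)).1
      ∧ VR (pushA nc t nb (Q ++ mapT nc (t + 1) acc, d)).2 (pushChild nc nb (acc, s)).2 := by
  have hcond : (iswall nc nb = true ∧ d.contains (nc, nb) = false)
      ↔ ((0 ≤ nb ∧ nb ≤ 200000) ∧ s.contains (nc, nb) = false) := by
    rw [iswall_eq_decide, hvr (nc, nb)]
    simp [hgate.1, hgate.2]
  by_cases hc : (0 ≤ nb ∧ nb ≤ 200000) ∧ s.contains (nc, nb) = false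
  · rw [pushA, pushChild]
    rw [if_pos (hcond.mpr hc), if_pos hc]
    refine ⟨by simp [mapT], ?_⟩
    intro k
    rw [Std.HashMap.contains_insert, Std.HashSet.contains_insert, hvr k]
  · rw [pushA, pushChild]
    rw [if_neg (fun h => hc (hcond.mp h)), if_neg hc]
    exact ⟨rfl, hvr⟩

lemma push3_sim (nc t b : Int) (Q : List (Int × Int × Int)) (acc : List Int)
    (d : Std.HashMap (Int × Int) Int) (s : Std.HashSet (Int × Int))
    (hvr : VR d s) (hgate : 0 ≤ nc ∧ nc ≤ 200000) :
    (pushA nc t (2 * b) (pushA nc t (b + 1) (pushA nc t (b - 1) (Q ++ mapT nc (t + 1) acc, d)))).1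
        = Q ++ mapT nc (t + 1)
            ([b - 1, b + 1, 2 * b].foldl (fun st nb => pushChild nc nb st) (acc, s)).1
      ∧ VR (pushA nc t (2 * b) (pushA nc t (b + 1) (pushA nc t (b - 1) (Q ++ mapT nc (t + 1) acc, d)))).2
           ([b - 1, b + 1, 2 * b].foldl (fun st nb => pushChild nc nb st) (acc, s)).2 := by
  simp only [List.foldl_cons, List.foldl_nil]
  obtain ⟨e1, v1⟩ := push_sim nc t (b - 1) Q acc d s hvr hgate
  have r1 : pushA nc t (b - 1) (Q ++ mapT nc (t + 1) acc, d)
      = (Q ++ mapT nc (t + 1) (pushChild nc (b - 1) (acc, s)).1,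
         (pushA nc t (b - 1) (Q ++ mapT nc (t + 1) acc, d)).2) :=
    Prod.ext e1 rfl
  rw [r1]
  obtain ⟨e2, v2⟩ := push_sim nc t (b + 1) Q (pushChild nc (b - 1) (acc, s)).1
      (pushA nc t (b - 1) (Q ++ mapT nc (t + 1) acc, d)).2 (pushChild nc (b - 1) (acc, s)).2 v1 hgate
  have heta1 : pushChild nc (b - 1) (acc, s)
      = ((pushChild nc (b - 1) (acc, s)).1, (pushChild nc (b - 1) (acc, s)).2) := rfl
  rw [← heta1] at e2 v2
  have r2 : pushA nc t (b + 1) (Q ++ mapT nc (t + 1) (pushChild nc (b - 1) (acc, s)).1,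
        (pushA nc t (b - 1) (Q ++ mapT nc (t + 1) acc, d)).2)
      = (Q ++ mapT nc (t + 1) (pushChild nc (b + 1) (pushChild nc (b - 1) (acc, s))).1,
         (pushA nc t (b + 1) (Q ++ mapT nc (t + 1) (pushChild nc (b - 1) (acc, s)).1,
            (pushA nc t (b - 1) (Q ++ mapT nc (t + 1) acc, d)).2)).2) :=
    Prod.ext e2 rfl
  rw [r2]
  obtain ⟨e3, v3⟩ := push_sim nc t (2 * b) Q
      (pushChild nc (b + 1) (pushChild nc (b - 1) (acc, s))).1
      _ (pushChild nc (b + 1) (pushChild nc (b - 1) (acc, s))).2 v2 hgate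
  have heta2 : pushChild nc (b + 1) (pushChild nc (b - 1) (acc, s))
      = ((pushChild nc (b + 1) (pushChild nc (b - 1) (acc, s))).1,
         (pushChild nc (b + 1) (pushChild nc (b - 1) (acc, s))).2) := rfl
  rw [← heta2] at e3 v3
  exact ⟨e3, v3⟩

lemma iswall_false {x : Int} (y : Int) (h : ¬ (0 ≤ x ∧ x ≤ 200000)) : iswall x y = false := by
  rw [iswall_eq_decide]; simp [h]

lemma pushA_nogate (nc t nb : Int) (st : List (Int × Int × Int) × Std.HashMap (Int × Int) Int)
    (h : ¬ (0 ≤ nc ∧ nc ≤ 200000)) : pushA nc t nb st = st := by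
  rw [pushA, if_neg]
  rintro ⟨hw, -⟩
  rw [iswall_false nb h] at hw
  exact Bool.false_ne_true hw

lemma pushChild_len (nc nb : Int) (st : List Int × Std.HashSet (Int × Int)) :
    (pushChild nc nb st).1.length ≤ st.1.length + 1 := by
  rw [pushChild]
  split_ifs <;> simp

lemma expandLevel_len (nc : Int) :
    ∀ (F : List Int) (st : List Int × Std.HashSet (Int × Int)),
      (expandLevel nc F st).1.length ≤ st.1.length + 3 * F.length := by
  intro F
  induction F with
  | nil => intro st; rw [expandLevel]; simp
  | cons b bs ih =>
    intro st
    rw [expandLevel]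
    refine le_trans (ih _) ?_
    simp only [List.foldl_cons, List.foldl_nil]
    have l1 := pushChild_len nc (b - 1) st
    have l2 := pushChild_len nc (b + 1) (pushChild nc (b - 1) st)
    have l3 := pushChild_len nc (2 * b) (pushChild nc (b + 1) (pushChild nc (b - 1) st))
    simp only [List.length_cons]
    omega

lemma levelA_found (sc c t : Int) :
    ∀ (F acc : List Int) (f : Nat) (d : Std.HashMap (Int × Int) Int),
      (∃ x ∈ F, c = x) →
      solveLoop sc (f + F.length)
          (mapT c t F ++ mapT (sc + PySem.Int.floordiv (t * (t + 1)) 2) (t + 1) acc) d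
        = t - 1 := by
  intro F
  induction F with
  | nil => intro acc f d hex; simp at hex
  | cons b bs ih =>
    intro acc f d hex
    rw [show mapT c t (b :: bs) ++ mapT (sc + PySem.Int.floordiv (t * (t + 1)) 2) (t + 1) acc
          = (c, b, t) :: (mapT c t bs ++ mapT (sc + PySem.Int.floordiv (t * (t + 1)) 2) (t + 1) acc)
        from by simp [mapT]]
    rw [show f + (b :: bs).length = (f + bs.length) + 1 from by simp; omega]
    by_cases hcb : c = b
    · exact solveLoop_pop_eq sc (f + bs.length) c b t _ d hcb
    · have hshape : ∀ nb (st : List (Int × Int × Int) × Std.HashMap (Int × Int) Int)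
          (acc' : List Int),
          st.1 = mapT c t bs ++ mapT (sc + PySem.Int.floordiv (t * (t + 1)) 2) (t + 1) acc' →
          ∃ acc'', (pushA (sc + PySem.Int.floordiv (t * (t + 1)) 2) t nb st).1
            = mapT c t bs ++ mapT (sc + PySem.Int.floordiv (t * (t + 1)) 2) (t + 1) acc'' := by
        intro nb st acc' hst
        rw [pushA]
        split_ifs with h
        · exact ⟨acc' ++ [nb], by simp [hst, mapT]⟩
        · exact ⟨acc', hst⟩
      have hex' : ∃ x ∈ bs, c = x := by
        rcases hex with ⟨x, hx, hcx⟩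
        rcases List.mem_cons.mp hx with h | h
        · exact absurd (h ▸ hcx) hcb
        · exact ⟨x, h, hcx⟩
      rw [solveLoop_cons sc (f + bs.length) c b t _ d hcb]
      obtain ⟨a1, h1⟩ := hshape (b - 1) (_, d) acc rfl
      obtain ⟨a2, h2⟩ := hshape (b + 1) _ a1 h1
      obtain ⟨a3, h3⟩ := hshape (2 * b) _ a2 h2
      rw [h3]
      exact ih a3 f _ hex'

lemma levelA_nogate (sc c t : Int)
    (hngate : ¬ (0 ≤ sc + PySem.Int.floordiv (t * (t + 1)) 2
        ∧ sc + PySem.Int.floordiv (t * (t + 1)) 2 ≤ 200000)) :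
    ∀ (F acc : List Int) (f : Nat) (d : Std.HashMap (Int × Int) Int),
      (∀ x ∈ F, ¬ c = x) →
      solveLoop sc (f + F.length)
          (mapT c t F ++ mapT (sc + PySem.Int.floordiv (t * (t + 1)) 2) (t + 1) acc) d
        = solveLoop sc f (mapT (sc + PySem.Int.floordiv (t * (t + 1)) 2) (t + 1) acc) d := by
  intro F
  induction F with
  | nil => intro acc f d _; simp [mapT]
  | cons b bs ih =>
    intro acc f d hno
    rw [show mapT c t (b :: bs) ++ mapT (sc + PySem.Int.floordiv (t * (t + 1)) 2) (t + 1) acc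
          = (c, b, t) :: (mapT c t bs ++ mapT (sc + PySem.Int.floordiv (t * (t + 1)) 2) (t + 1) acc)
        from by simp [mapT]]
    rw [show f + (b :: bs).length = (f + bs.length) + 1 from by simp; omega]
    rw [solveLoop_cons sc (f + bs.length) c b t _ d (hno b (by simp))]
    rw [pushA_nogate _ _ _ _ hngate, pushA_nogate _ _ _ _ hngate, pushA_nogate _ _ _ _ hngate]
    exact ih acc f d (fun x hx => hno x (by simp [hx]))

lemma levelA_gate (sc c t : Int)
    (hgate : 0 ≤ sc + PySem.Int.floordiv (t * (t + 1)) 2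
        ∧ sc + PySem.Int.floordiv (t * (t + 1)) 2 ≤ 200000) :
    ∀ (F acc : List Int) (f : Nat) (d : Std.HashMap (Int × Int) Int) (s : Std.HashSet (Int × Int)),
      VR d s → (∀ x ∈ F, ¬ c = x) →
      ∃ d', VR d' (expandLevel (sc + PySem.Int.floordiv (t * (t + 1)) 2) F (acc, s)).2 ∧
        solveLoop sc (f + F.length)
            (mapT c t F ++ mapT (sc + PySem.Int.floordiv (t * (t + 1)) 2) (t + 1) acc) d
          = solveLoop sc f
              (mapT (sc + PySem.Int.floordiv (t * (t + 1)) 2) (t + 1)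
                (expandLevel (sc + PySem.Int.floordiv (t * (t + 1)) 2) F (acc, s)).1) d' := by
  intro F
  induction F with
  | nil =>
    intro acc f d s hvr _
    exact ⟨d, by rw [expandLevel]; exact hvr, by simp [mapT, expandLevel]⟩
  | cons b bs ih =>
    intro acc f d s hvr hno
    rw [show mapT c t (b :: bs) ++ mapT (sc + PySem.Int.floordiv (t * (t + 1)) 2) (t + 1) acc
          = (c, b, t) :: (mapT c t bs ++ mapT (sc + PySem.Int.floordiv (t * (t + 1)) 2) (t + 1) acc)
        from by simp [mapT]]
    rw [show f + (b :: bs).length = (f + bs.length) + 1 from by simp; omega]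
    rw [solveLoop_cons sc (f + bs.length) c b t _ d (hno b (by simp))]
    obtain ⟨e3, v3⟩ := push3_sim (sc + PySem.Int.floordiv (t * (t + 1)) 2) t b
        (mapT c t bs) acc d s hvr hgate
    rw [e3]
    obtain ⟨d', hd1, hd2⟩ := ih
        ([b - 1, b + 1, 2 * b].foldl
          (fun st nb => pushChild (sc + PySem.Int.floordiv (t * (t + 1)) 2) nb st) (acc, s)).1
        f _
        ([b - 1, b + 1, 2 * b].foldl
          (fun st nb => pushChild (sc + PySem.Int.floordiv (t * (t + 1)) 2) nb st) (acc, s)).2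
        v3 (fun x hx => hno x (by simp [hx]))
    have hexp : expandLevel (sc + PySem.Int.floordiv (t * (t + 1)) 2) (b :: bs) (acc, s)
        = expandLevel (sc + PySem.Int.floordiv (t * (t + 1)) 2) bs
            ([b - 1, b + 1, 2 * b].foldl
              (fun st nb => pushChild (sc + PySem.Int.floordiv (t * (t + 1)) 2) nb st) (acc, s)) := by
      rw [expandLevel]
    refine ⟨d', ?_, ?_⟩
    · rw [hexp]; exact hd1
    · rw [hexp]; exact hd2

lemma solveAltLoop_found (sc : Int) (f : Nat) (c t b : Int) (bs : List Int)
    (s : Std.HashSet (Int × Int)) (h : (b :: bs).contains c = true) :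
    solveAltLoop sc (f + 1) (b :: bs) c t s = t - 1 := by
  conv_lhs => rw [solveAltLoop]
  rw [if_pos h]

lemma solveAltLoop_step_gate (sc : Int) (f : Nat) (c t b : Int) (bs : List Int)
    (s : Std.HashSet (Int × Int))
    (hm : ¬ (b :: bs).contains c = true)
    (hgate : 0 ≤ sc + PySem.Int.floordiv (t * (t + 1)) 2
        ∧ sc + PySem.Int.floordiv (t * (t + 1)) 2 ≤ 200000) :
    solveAltLoop sc (f + 1) (b :: bs) c t s
      = solveAltLoop sc f
          (expandLevel (sc + PySem.Int.floordiv (t * (t + 1)) 2) (b :: bs) ([], s)).1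
          (sc + PySem.Int.floordiv (t * (t + 1)) 2) (t + 1)
          (expandLevel (sc + PySem.Int.floordiv (t * (t + 1)) 2) (b :: bs) ([], s)).2 := by
  conv_lhs => rw [solveAltLoop]
  rw [if_neg hm]
  dsimp only
  rw [if_pos hgate]

lemma solveAltLoop_step_nogate (sc : Int) (f : Nat) (c t b : Int) (bs : List Int)
    (s : Std.HashSet (Int × Int))
    (hm : ¬ (b :: bs).contains c = true)
    (hngate : ¬ (0 ≤ sc + PySem.Int.floordiv (t * (t + 1)) 2
        ∧ sc + PySem.Int.floordiv (t * (t + 1)) 2 ≤ 200000)) :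
    solveAltLoop sc (f + 1) (b :: bs) c t s = -1 := by
  conv_lhs => rw [solveAltLoop]
  rw [if_neg hm]
  dsimp only
  rw [if_neg hngate]
  exact solveAltLoop_nil sc f (sc + PySem.Int.floordiv (t * (t + 1)) 2) (t + 1) s

-- fuel bookkeeping for A across one level: what remains still dominates the next level
lemma fuel_step (fA m m' p : Nat) (hA : m * (3 * p - 1) ≤ 2 * fA) (hm : 1 ≤ m)
    (hm' : m' ≤ 3 * m) (hp : 1 ≤ p) : m' * (p - 1) ≤ 2 * (fA - m) := by
  obtain ⟨q, rfl⟩ : ∃ q, p = q + 1 := ⟨p - 1, by omega⟩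
  have e1 : m * (3 * (q + 1) - 1) = 3 * (m * q) + 2 * m := by
    have h : 3 * (q + 1) - 1 = 3 * q + 2 := by omega
    rw [h]; ring
  rw [e1] at hA
  have h1 : m' * ((q + 1) - 1) ≤ 3 * (m * q) := by
    simp only [Nat.add_sub_cancel]
    calc m' * q ≤ (3 * m) * q := Nat.mul_le_mul_right _ hm'
      _ = 3 * (m * q) := by ring
  omega

lemma main_sim (sc : Int) (hsc : -2147483648 ≤ sc) :
    ∀ (n : Nat) (t : Int), 65601 - t ≤ (n : Int) →
    ∀ (F : List Int) (c : Int) (fA fB : Nat)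
      (d : Std.HashMap (Int × Int) Int) (s : Std.HashSet (Int × Int)),
      VR d s → F.length * (3 ^ (n + 1) - 1) ≤ 2 * fA → n + 1 ≤ fB →
      solveLoop sc fA (mapT c t F) d = solveAltLoop sc fB F c t s := by
  intro n
  induction n with
  | zero =>
    intro t ht F c fA fB d s hvr hA hB
    have hngate := gate_dead sc t hsc (Or.inl (by omega))
    cases F with
    | nil => rw [show mapT c t ([] : List Int) = [] from rfl, solveLoop_nil, solveAltLoop_nil]
    | cons b bs =>
      obtain ⟨fB', rfl⟩ : ∃ k, fB = k + 1 := ⟨fB - 1, by omega⟩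
      by_cases hmem : (b :: bs).contains c = true
      · rw [solveAltLoop_found sc fB' c t b bs s hmem]
        have hex : ∃ x ∈ (b :: bs), c = x :=
          ⟨c, List.contains_iff_mem.mp hmem, rfl⟩
        have hflen : (b :: bs).length ≤ fA := by
          have : (b :: bs).length * 2 ≤ 2 * fA := by
            calc (b :: bs).length * 2 ≤ (b :: bs).length * (3 ^ (0 + 1) - 1) := by
                  exact Nat.mul_le_mul_left _ (by norm_num)
              _ ≤ 2 * fA := hA
          omega
        rw [show fA = (fA - (b :: bs).length) + (b :: bs).length from by omega]
        have := levelA_found sc c t (b :: bs) [] (fA - (b :: bs).length) d hex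
        simpa [mapT] using this
      · have hno : ∀ x ∈ (b :: bs), ¬ c = x := by
          intro x hx hcx
          exact hmem (List.contains_iff_mem.mpr (hcx ▸ hx))
        rw [solveAltLoop_step_nogate sc fB' c t b bs s hmem hngate]
        have hflen : (b :: bs).length ≤ fA := by
          have : (b :: bs).length * 2 ≤ 2 * fA := by
            calc (b :: bs).length * 2 ≤ (b :: bs).length * (3 ^ (0 + 1) - 1) := by
                  exact Nat.mul_le_mul_left _ (by norm_num)
              _ ≤ 2 * fA := hA
          omega
        rw [show fA = (fA - (b :: bs).length) + (b :: bs).length from by omega]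
        have := levelA_nogate sc c t hngate (b :: bs) [] (fA - (b :: bs).length) d hno
        simp only [mapT, List.map_nil, List.append_nil] at this
        rw [show mapT c t (b :: bs) = (b :: bs).map (fun x => (c, x, t)) from rfl]
        rw [this, solveLoop_nil]
  | succ n ih =>
    intro t ht F c fA fB d s hvr hA hB
    cases F with
    | nil => rw [show mapT c t ([] : List Int) = [] from rfl, solveLoop_nil, solveAltLoop_nil]
    | cons b bs =>
      obtain ⟨fB', rfl⟩ : ∃ k, fB = k + 1 := ⟨fB - 1, by omega⟩
      have hp1 : (1 : Nat) ≤ 3 ^ (n + 1) := Nat.one_le_pow _ _ (by norm_num)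
      have hp2 : (1 : Nat) ≤ 3 ^ (n + 2) := Nat.one_le_pow _ _ (by norm_num)
      have hflen : (b :: bs).length ≤ fA := by
        have h2 : (b :: bs).length * 2 ≤ (b :: bs).length * (3 ^ (n + 2) - 1) := by
          refine Nat.mul_le_mul_left _ ?_
          have : (9 : Nat) ≤ 3 ^ (n + 2) := by
            calc (9 : Nat) = 3 ^ 2 := by norm_num
              _ ≤ 3 ^ (n + 2) := Nat.pow_le_pow_right (by norm_num) (by omega)
          omega
        have := le_trans h2 hA
        omega
      by_cases hmem : (b :: bs).contains c = true
      · rw [solveAltLoop_found sc fB' c t b bs s hmem]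
        have hex : ∃ x ∈ (b :: bs), c = x :=
          ⟨c, List.contains_iff_mem.mp hmem, rfl⟩
        rw [show fA = (fA - (b :: bs).length) + (b :: bs).length from by omega]
        have := levelA_found sc c t (b :: bs) [] (fA - (b :: bs).length) d hex
        simpa [mapT] using this
      · have hno : ∀ x ∈ (b :: bs), ¬ c = x := by
          intro x hx hcx
          exact hmem (List.contains_iff_mem.mpr (hcx ▸ hx))
        by_cases hgate : 0 ≤ sc + PySem.Int.floordiv (t * (t + 1)) 2
            ∧ sc + PySem.Int.floordiv (t * (t + 1)) 2 ≤ 200000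
        · have htlt : t ≤ 65600 := by
            by_contra hgt
            exact gate_dead sc t hsc (Or.inl (by omega)) hgate
          obtain ⟨d', hvr', heq⟩ := levelA_gate sc c t hgate (b :: bs) []
              (fA - (b :: bs).length) d s hvr hno
          rw [solveAltLoop_step_gate sc fB' c t b bs s hmem hgate]
          have hlen' : (expandLevel (sc + PySem.Int.floordiv (t * (t + 1)) 2) (b :: bs) ([], s)).1.length
              ≤ 3 * (b :: bs).length := by
            have := expandLevel_len (sc + PySem.Int.floordiv (t * (t + 1)) 2) (b :: bs) ([], s)
            simpa using this
          have hA' : (expandLevel (sc + PySem.Int.floordiv (t * (t + 1)) 2) (b :: bs) ([], s)).1.length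
                * (3 ^ (n + 1) - 1) ≤ 2 * (fA - (b :: bs).length) := by
            refine fuel_step fA (b :: bs).length _ (3 ^ (n + 1)) ?_ (by simp) hlen' hp1
            calc (b :: bs).length * (3 * 3 ^ (n + 1) - 1)
                = (b :: bs).length * (3 ^ (n + 2) - 1) := by rw [← pow_succ']
              _ ≤ 2 * fA := hA
          have hstep := ih (t + 1) (by omega)
              (expandLevel (sc + PySem.Int.floordiv (t * (t + 1)) 2) (b :: bs) ([], s)).1
              (sc + PySem.Int.floordiv (t * (t + 1)) 2) (fA - (b :: bs).length) fB' d'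
              (expandLevel (sc + PySem.Int.floordiv (t * (t + 1)) 2) (b :: bs) ([], s)).2
              hvr' hA' (by omega)
          rw [show fA = (fA - (b :: bs).length) + (b :: bs).length from by omega]
          have hq : mapT c t (b :: bs)
              = mapT c t (b :: bs)
                ++ mapT (sc + PySem.Int.floordiv (t * (t + 1)) 2) (t + 1) [] := by
            simp [mapT]
          rw [hq, heq, hstep]
        · rw [solveAltLoop_step_nogate sc fB' c t b bs s hmem hgate]
          rw [show fA = (fA - (b :: bs).length) + (b :: bs).length from by omega]
          have := levelA_nogate sc c t hgate (b :: bs) [] (fA - (b :: bs).length) d hno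
          simp only [mapT, List.map_nil, List.append_nil] at this
          rw [show mapT c t (b :: bs) = (b :: bs).map (fun x => (c, x, t)) from rfl]
          rw [this, solveLoop_nil]

-- ===== VERDICT (by name: the statement is the Claim_ definition above) =====
theorem solve_spec : Claim_equal_solve := by
  intro start_cony brown time hdom
  unfold Spec_solve solve solve_alt
  have hvr : VR Std.HashMap.emptyWithCapacity Std.HashSet.emptyWithCapacity := by
    intro k
    rw [Std.HashMap.contains_emptyWithCapacity, Std.HashSet.contains_emptyWithCapacity]
  have hdom' : -2147483648 ≤ start_cony ∧ -2147483648 ≤ time := by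
    unfold Dom_solve pvDomInt at hdom
    simp only [Bool.and_eq_true, decide_eq_true_eq] at hdom
    exact ⟨hdom.1.1.1, hdom.2.1⟩
  by_cases hlow : time ≤ -65602
  · -- far below the active window: the very first level is already dead on both sides
    have hngate := gate_dead start_cony time hdom'.1 (Or.inr hlow)
    by_cases hmem : ([brown] : List Int).contains start_cony = true
    · rw [show (131207 : Nat) = 131206 + 1 from rfl,
          solveAltLoop_found start_cony 131206 start_cony time brown [] Std.HashSet.emptyWithCapacity hmem]
      have hex : ∃ x ∈ ([brown] : List Int), start_cony = x :=
        ⟨start_cony, List.contains_iff_mem.mp hmem, rfl⟩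
      have hpow : 0 < (3 : Nat) ^ 131205 := Nat.pow_pos (by norm_num)
      rw [show ((3 : Nat) ^ 131205) = (3 ^ 131205 - 1) + 1 from by omega]
      have := levelA_found start_cony start_cony time [brown] [] (3 ^ 131205 - 1)
          Std.HashMap.emptyWithCapacity hex
      simpa [mapT] using this
    · have hno : ∀ x ∈ ([brown] : List Int), ¬ start_cony = x := by
        intro x hx hcx
        exact hmem (List.contains_iff_mem.mpr (hcx ▸ hx))
      rw [show (131207 : Nat) = 131206 + 1 from rfl,
          solveAltLoop_step_nogate start_cony 131206 start_cony time brown [] Std.HashSet.emptyWithCapacity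
            hmem hngate]
      have := levelA_nogate start_cony start_cony time hngate [brown] [] (3 ^ 131205 - 1)
          Std.HashMap.emptyWithCapacity hno
      simp only [mapT, List.map_nil, List.append_nil] at this
      have hfe : (3 ^ 131205 - 1) + ([brown] : List Int).length = 3 ^ 131205 := by
        simp
        omega
      rw [show ([(start_cony, brown, time)] : List (Int × Int × Int))
            = ([brown] : List Int).map (fun x => (start_cony, x, time)) from rfl]
      rw [show (3 ^ 131205 : Nat) = (3 ^ 131205 - 1) + ([brown] : List Int).length from hfe.symm]
      rw [this, solveLoop_nil]
  · -- inside / above the window: run the level-by-level simulation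
    have := main_sim start_cony hdom'.1 (65601 - time).toNat time (by omega)
        [brown] start_cony (3 ^ 131205) 131207 Std.HashMap.emptyWithCapacity Std.HashSet.emptyWithCapacity hvr
        ?_ ?_
    · simpa [mapT] using this
    · have hn : (65601 - time).toNat + 1 ≤ 131204 := by omega
      calc ([brown] : List Int).length * (3 ^ ((65601 - time).toNat + 1) - 1)
          ≤ 1 * 3 ^ 131204 := by
            simp only [List.length_cons, List.length_nil, one_mul]
            have := Nat.pow_le_pow_right (show 1 ≤ 3 by norm_num) hn
            omega
        _ ≤ 2 * 3 ^ 131205 := by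
            rw [one_mul, show (131205 : ℕ) = 131204 + 1 from rfl, pow_succ]
            have hxp : 0 < (3 : Nat) ^ 131204 := Nat.pow_pos (by norm_num)
            omega
    · omega
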